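-- pv_equiv track=rewrite | github.com/tschelbs18/public_python_challenge | level7.py | fn_compare_letters_dicts
-- ===== SOURCE A (Python) =====
-- def fn_get_letters_dict(word):
--     letters_dict = {}
--     for letter in word:
--         if letter in letters_dict.keys():
--             letters_dict[letter] += 1
--         else:
--             letters_dict[letter] = 1
--     return letters_dict
--
-- def fn_compare_letters_dicts(sub_word, full_word):
--     test_word = fn_get_letters_dict(sub_word)
--     master_word = fn_get_letters_dict(full_word)
--
--     for letter in test_word.keys():
--         if letter not in master_word.keys():
--             return False
--         elif test_word[letter] > master_word[letter]:
--             return False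
--     return True
-- ===== SOURCE B (Python) =====
-- def fn_compare_letters_dicts(sub_word, full_word):
--     need = {}
--     for ch in sub_word:
--         need[ch] = need.get(ch, 0) + 1
--     for ch in full_word:
--         if ch in need:
--             need[ch] -= 1
--     return all(v <= 0 for v in need.values())
-- ===== Notes on version B (the rewrite author's own statement) =====
-- stated objective: simpler
-- what changed: B replaces A's two full letter-count tables plus a separate comparison scan over sub's keys with one 'need' table built from sub_word and consumed by a single decrementing pass over full_word, returning whether all remaining requirements are <= 0.
import Mathlib
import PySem

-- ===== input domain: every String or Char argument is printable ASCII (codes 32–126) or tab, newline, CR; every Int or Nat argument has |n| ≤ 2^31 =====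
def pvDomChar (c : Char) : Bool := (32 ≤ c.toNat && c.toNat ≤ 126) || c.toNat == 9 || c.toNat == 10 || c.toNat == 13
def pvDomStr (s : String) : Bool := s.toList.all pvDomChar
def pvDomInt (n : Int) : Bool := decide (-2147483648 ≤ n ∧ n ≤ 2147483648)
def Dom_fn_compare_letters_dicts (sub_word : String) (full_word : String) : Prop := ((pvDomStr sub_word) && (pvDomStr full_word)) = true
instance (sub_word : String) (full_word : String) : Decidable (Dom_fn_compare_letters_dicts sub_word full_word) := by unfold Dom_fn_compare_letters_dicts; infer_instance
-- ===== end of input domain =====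

-- B replaces A's two full count tables and a separate scan over sub's keys by one
-- `need` table consumed in a single pass over full_word; objective: simpler (same cost).

-- ===== PORT A =====
-- helper fn_get_letters_dict: count letters, branching on key presence as A does
def pvGetLettersDict (word : String) : PySem.Dict Char Int :=
  word.toList.foldl
    (fun d c => if d.contains c then d.insert c (d.getD c 0 + 1) else d.insert c 1)
    PySem.Dict.empty

-- A's early-return loop over test_word's keys
def pvLoopA (test master : PySem.Dict Char Int) : List Char → Bool
  | [] => true
  | c :: rest =>
    if master.contains c = false then false
    else if test.getD c 0 > master.getD c 0 then false
    else pvLoopA test master rest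

def fn_compare_letters_dicts (sub_word : String) (full_word : String) : Bool :=
  let test_word := pvGetLettersDict sub_word
  let master_word := pvGetLettersDict full_word
  pvLoopA test_word master_word test_word.keys

-- ===== PORT B =====
def fn_compare_letters_dicts_alt (sub_word : String) (full_word : String) : Bool :=
  let need := sub_word.toList.foldl
    (fun d c => d.insert c (d.getD c 0 + 1)) (PySem.Dict.empty : PySem.Dict Char Int)
  let need' := full_word.toList.foldl
    (fun d c => if d.contains c then d.insert c (d.getD c 0 - 1) else d) need
  need'.values.all (fun v => v ≤ 0)

-- ===== PRECONDITION & SPEC =====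
def Spec_fn_compare_letters_dicts (sub_word : String) (full_word : String) (out : Bool) : Prop := out = fn_compare_letters_dicts_alt sub_word full_word
instance (sub_word : String) (full_word : String) (out : Bool) : Decidable (Spec_fn_compare_letters_dicts sub_word full_word out) := by unfold Spec_fn_compare_letters_dicts; infer_instance

-- ===== CLAIM (what is proved, stated in full; the proofs are below) =====
def Claim_equal_fn_compare_letters_dicts : Prop := ∀ (sub_word : String) (full_word : String), Dom_fn_compare_letters_dicts sub_word full_word → Spec_fn_compare_letters_dicts sub_word full_word (fn_compare_letters_dicts sub_word full_word)

-- ===== LEMMAS AND PROOFS =====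

-- A's build loop is the standard counter loop: in the non-contained branch getD is 0
theorem pvGetLettersDict_eq_counter (word : String) :
    pvGetLettersDict word = PySem.Dict.counter word.toList := by
  unfold pvGetLettersDict
  rw [show (fun (d : PySem.Dict Char Int) (c : Char) =>
        if d.contains c then d.insert c (d.getD c 0 + 1) else d.insert c 1)
      = (fun d c => d.insert c (d.getD c 0 + 1)) from ?_]
  · exact PySem.Dict.foldl_insert_getD_add_one_eq_counter word.toList
  · funext d c
    by_cases h : d.contains c
    · simp [h]
    · simp only [Bool.not_eq_true] at h
      simp [h, PySem.Dict.getD_of_not_contains d 0 h]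

-- A's early-return loop as an `all` over the key list
theorem pvLoopA_eq_all (test master : PySem.Dict Char Int) (ks : List Char) :
    pvLoopA test master ks
      = ks.all (fun c => master.contains c && !(test.getD c 0 > master.getD c 0)) := by
  induction ks with
  | nil => rfl
  | cons c rest ih =>
    by_cases h : master.contains c
    · by_cases h2 : test.getD c 0 > master.getD c 0 <;> simp [pvLoopA, h, h2, ih]
    · simp only [Bool.not_eq_true] at h
      simp [pvLoopA, h]

-- B's decrement loop: keys are unchanged …
theorem decLoop_keys (l : List Char) (d : PySem.Dict Char Int) :
    (l.foldl (fun d c => if d.contains c then d.insert c (d.getD c 0 - 1) else d) d).keys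
      = d.keys := by
  induction l generalizing d with
  | nil => rfl
  | cons c rest ih =>
    by_cases h : d.contains c
    · simp [List.foldl_cons, h, ih, PySem.Dict.keys_insert_of_contains d _ h]
    · simp only [Bool.not_eq_true] at h
      simp [List.foldl_cons, h, ih]

-- … and the value at each key goes down by that key's count in l
theorem decLoop_getD (l : List Char) (d : PySem.Dict Char Int) (c : Char)
    (hc : d.contains c = true) :
    (l.foldl (fun d c => if d.contains c then d.insert c (d.getD c 0 - 1) else d) d).getD c 0
      = d.getD c 0 - l.count c := by
  induction l generalizing d with
  | nil => simp
  | cons x rest ih =>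
    by_cases h : d.contains x
    · rw [List.foldl_cons, if_pos h,
        ih (d.insert x (d.getD x 0 - 1)) (by simp [PySem.Dict.contains_insert, hc]),
        PySem.Dict.getD_insert]
      by_cases hxc : c = x
      · subst hxc; simp; ring
      · simp [hxc, Ne.symm hxc]
    · simp only [Bool.not_eq_true] at h
      rw [List.foldl_cons, if_neg (by simp [h]), ih d hc, List.count_cons]
      have hne : ¬ (x = c) := fun he => by rw [he] at h; rw [h] at hc; cases hc
      simp [hne]

-- contains of the counter at a member key
theorem contains_counter_of_mem {c : Char} {xs : List Char} (h : c ∈ xs) :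
    (PySem.Dict.counter xs).contains c = true := by
  rw [PySem.Dict.contains_counter]
  exact List.contains_iff_mem.mpr h

theorem fn_compare_eq (sub_word full_word : String) :
    fn_compare_letters_dicts sub_word full_word
      = fn_compare_letters_dicts_alt sub_word full_word := by
  have hA : fn_compare_letters_dicts sub_word full_word
      = pvLoopA (PySem.Dict.counter sub_word.toList) (PySem.Dict.counter full_word.toList)
          (PySem.Dict.counter sub_word.toList).keys := by
    unfold fn_compare_letters_dicts
    rw [pvGetLettersDict_eq_counter, pvGetLettersDict_eq_counter]
  -- B's first loop is the counter loop (definitional, foldl_insert_getD_add_one_eq_counter)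
  have hB : fn_compare_letters_dicts_alt sub_word full_word
      = (full_word.toList.foldl
          (fun d c => if d.contains c then d.insert c (d.getD c 0 - 1) else d)
          (PySem.Dict.counter sub_word.toList)).values.all (fun v => v ≤ 0) := by
    unfold fn_compare_letters_dicts_alt
    show (List.foldl
        (fun (d : PySem.Dict Char Int) c => if d.contains c then d.insert c (d.getD c 0 - 1) else d)
        (List.foldl (fun (d : PySem.Dict Char Int) c => d.insert c (d.getD c 0 + 1))
          PySem.Dict.empty sub_word.toList)
        full_word.toList).values.all (fun v => decide (v ≤ 0)) = _
    rw [PySem.Dict.foldl_insert_getD_add_one_eq_counter sub_word.toList]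
  rw [hA]
  rw [hB]
  rw [pvLoopA_eq_all]
  set dec := full_word.toList.foldl
      (fun d c => if d.contains c then d.insert c (d.getD c 0 - 1) else d)
      (PySem.Dict.counter sub_word.toList) with hdec
  have hkeys : dec.keys = (PySem.Dict.counter sub_word.toList).keys :=
    decLoop_keys _ _
  have hnd : dec.keys.Nodup := by rw [hkeys]; exact PySem.Dict.nodup_keys_counter _
  rw [PySem.Dict.values_eq_map_keys dec hnd 0, List.all_map, hkeys,
    PySem.Dict.keys_counter]
  rw [Bool.eq_iff_iff]
  simp only [List.all_eq_true]
  constructor <;> intro h c hc <;>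
    have hmem : c ∈ sub_word.toList := (PySem.Set.mem_ofList _ _).mp hc <;>
    have hcnt : dec.getD c 0 = (List.count c sub_word.toList : Int) - List.count c full_word.toList := by
      rw [hdec, decLoop_getD _ _ _ (contains_counter_of_mem hmem), PySem.Dict.getD_counter]
  · have := h c hc
    simp only [PySem.Dict.contains_counter, PySem.Dict.getD_counter, Bool.and_eq_true,
      Bool.not_eq_true', decide_eq_false_iff_not, not_lt] at this
    simp only [Function.comp_apply, decide_eq_true_eq, hcnt]
    omega
  · have := h c hc
    simp only [Function.comp_apply, decide_eq_true_eq, hcnt] at this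
    have hpos : 0 < List.count c sub_word.toList := List.count_pos_iff.mpr hmem
    simp only [PySem.Dict.contains_counter, PySem.Dict.getD_counter, Bool.and_eq_true,
      Bool.not_eq_true', decide_eq_false_iff_not, not_lt]
    exact ⟨List.contains_iff_mem.mpr (List.count_pos_iff.mp (by omega)), by omega⟩

-- ===== VERDICT (by name: the statement is the Claim_ definition above) =====
theorem fn_compare_letters_dicts_spec : Claim_equal_fn_compare_letters_dicts := by
  intro sub_word full_word _
  exact fn_compare_eq sub_word full_word
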